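-- pv_equiv track=rewrite | github.com/cazhjo/advent-of-code-2020 | 6.py | count
-- ===== SOURCE A (Python) =====
-- def count(questions):
--     used = []
--     count = 0
--
--     for question in questions:
--         if question == "\n":
--             used = []
--             continue
--
--         for letter in question:
--             if letter in used or letter == "\n":
--                 continue
--
--             count += 1
--             used.append(letter)
--
--     return count
-- ===== SOURCE B (Python) =====
-- def count(questions):
--     # partition lines into groups separated by lines equal to "\n", then sum distinct non-'\n' chars per group
--     groups = []
--     cur = []
--     for question in questions:
--         if question == "\n":
--             groups.append(cur)
--             cur = []
--         else:
--             cur.append(question)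
--     groups.append(cur)
--     return sum(len({c for line in g for c in line if c != "\n"}) for g in groups)
-- ===== Notes on version B (the rewrite author's own statement) =====
-- stated objective: simpler
-- what changed: Replaced the interleaved accumulate-and-reset loop (mutable 'used' list with membership scans) by a two-phase decomposition: partition the lines into groups at '\n' separators, then sum the size of a per-group set comprehension of non-newline characters.
import Mathlib
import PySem

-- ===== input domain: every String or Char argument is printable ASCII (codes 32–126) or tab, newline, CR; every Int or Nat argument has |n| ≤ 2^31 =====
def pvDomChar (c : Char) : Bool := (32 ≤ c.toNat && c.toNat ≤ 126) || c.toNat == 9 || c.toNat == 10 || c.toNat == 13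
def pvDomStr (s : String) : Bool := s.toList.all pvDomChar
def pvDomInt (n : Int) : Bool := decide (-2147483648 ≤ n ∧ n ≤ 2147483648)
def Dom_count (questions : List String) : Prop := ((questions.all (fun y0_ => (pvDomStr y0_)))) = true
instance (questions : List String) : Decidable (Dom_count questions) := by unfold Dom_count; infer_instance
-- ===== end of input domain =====

-- B replaces A's interleaved accumulate-and-reset loop by an explicit partition-into-groups
-- phase followed by a per-group distinct-character count (objective: simpler decomposition).

-- ===== PORT A =====
def count (questions : List String) : Int :=
  (questions.foldl (fun (st : List Char × Int) question =>
      if question = "\n" then ([], st.2)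
      else question.toList.foldl (fun (st : List Char × Int) letter =>
          if letter ∈ st.1 ∨ letter = '\n' then st
          else (st.1 ++ [letter], st.2 + 1)) st)
    ([], 0)).2

-- ===== PORT B =====
def count_alt (questions : List String) : Int :=
  let p := questions.foldl (fun (st : List (List String) × List String) question =>
      if question = "\n" then (st.1 ++ [st.2], [])
      else (st.1, st.2 ++ [question])) ([], [])
  let groups := p.1 ++ [p.2]
  (groups.map (fun g =>
      ((PySem.Set.len (PySem.Set.ofList ((g.flatMap String.toList).filter (fun c => c ≠ '\n')))) : Int))).sum

-- ===== PRECONDITION & SPEC =====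
def Spec_count (questions : List String) (out : Int) : Prop := out = count_alt questions
instance (questions : List String) (out : Int) : Decidable (Spec_count questions out) := by unfold Spec_count; infer_instance

-- ===== CLAIM (what is proved, stated in full; the proofs are below) =====
def Claim_equal_count : Prop := ∀ (questions : List String), Dom_count questions → Spec_count questions (count questions)

-- ===== LEMMAS AND PROOFS =====

-- A's per-character step
def aStepC (st : List Char × Int) (letter : Char) : List Char × Int :=
  if letter ∈ st.1 ∨ letter = '\n' then st else (st.1 ++ [letter], st.2 + 1)

-- A's per-line step
def aStepL (st : List Char × Int) (question : String) : List Char × Int :=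
  if question = "\n" then ([], st.2) else question.toList.foldl aStepC st

-- B's grouping step
def bStep (st : List (List String) × List String) (question : String) : List (List String) × List String :=
  if question = "\n" then (st.1 ++ [st.2], []) else (st.1, st.2 ++ [question])

-- the distinct non-newline characters of a (partial) group, first occurrences in order
def usedOf (cur : List String) : List Char :=
  PySem.Set.ofList ((cur.flatMap String.toList).filter (fun c => c ≠ '\n'))

def gval (g : List String) : Int := ((usedOf g).length : Int)

-- the groups produced by splitting qs at "\n" lines, starting from partial group cur
def partition (qs : List String) (cur : List String) : List (List String) :=
  match qs with
  | [] => [cur]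
  | q :: qs => if q = "\n" then cur :: partition qs [] else partition qs (cur ++ [q])

theorem count_eq (qs : List String) : count qs = (qs.foldl aStepL ([], 0)).2 := rfl

theorem ofList_append (l₁ l₂ : List Char) :
    PySem.Set.ofList (l₁ ++ l₂) = PySem.Set.update (PySem.Set.ofList l₁) l₂ := by
  simp [PySem.Set.ofList_eq_foldl, PySem.Set.update, List.foldl_append]

theorem usedOf_append (cur : List String) (q : String) :
    usedOf (cur ++ [q]) = PySem.Set.update (usedOf cur) (q.toList.filter (fun c => c ≠ '\n')) := by
  simp [usedOf, List.flatMap_append, List.filter_append, ofList_append]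

-- the character loop: the 'used' list becomes Set.update, the counter advances by the growth of 'used'
theorem foldl_aStepC (cs : List Char) : ∀ (u : List Char) (n : Int),
    cs.foldl aStepC (u, n)
      = (PySem.Set.update u (cs.filter (fun c => c ≠ '\n')),
         n - (u.length : Int) + ((PySem.Set.update u (cs.filter (fun c => c ≠ '\n'))).length : Int)) := by
  induction cs with
  | nil => intro u n; simp [PySem.Set.update]
  | cons c cs ih =>
    intro u n
    by_cases hnl : c = '\n'
    · simp [hnl, aStepC, ih u n]
    · by_cases hmem : c ∈ u
      · have : PySem.Set.add u c = u := by simp [PySem.Set.add, PySem.Set.contains, hmem]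
        simp [List.foldl_cons, aStepC, hmem, hnl, ih u n, PySem.Set.update]
      · simp [List.foldl_cons, aStepC, hmem, hnl, ih (u ++ [c]) (n + 1), PySem.Set.update]

-- the line loop, related to the partition of the remaining lines
theorem foldl_aStepL (qs : List String) : ∀ (cur : List String) (n : Int),
    (qs.foldl aStepL (usedOf cur, n)).2
      = n - gval cur + ((partition qs cur).map gval).sum := by
  induction qs with
  | nil => intro cur n; simp [partition, gval]
  | cons q qs ih =>
    intro cur n
    by_cases hq : q = "\n"
    · have h0 : usedOf [] = ([] : List Char) := rfl
      simp [List.foldl_cons, aStepL, hq, partition]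
      have := ih [] n
      rw [h0] at this
      simp [this, gval, usedOf]
      ring
    · simp only [List.foldl_cons, aStepL, hq, partition, if_false]
      rw [foldl_aStepC, ← usedOf_append]
      rw [ih (cur ++ [q]) (n - (usedOf cur).length + ((usedOf (cur ++ [q])).length : Int))]
      simp [gval]

-- B's grouping loop produces exactly the partition
theorem foldl_bStep (qs : List String) : ∀ (acc : List (List String)) (cur : List String),
    (qs.foldl bStep (acc, cur)).1 ++ [(qs.foldl bStep (acc, cur)).2]
      = acc ++ partition qs cur := by
  induction qs with
  | nil => intro acc cur; simp [partition]
  | cons q qs ih =>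
    intro acc cur
    by_cases hq : q = "\n"
    · simp [List.foldl_cons, bStep, hq, partition, ih (acc ++ [cur]) []]
    · simp [List.foldl_cons, bStep, hq, partition, ih acc (cur ++ [q])]

theorem count_alt_eq (qs : List String) : count_alt qs = ((partition qs []).map gval).sum := by
  unfold count_alt
  have h := foldl_bStep qs [] []
  simp only [List.nil_append] at h
  rw [show (fun (st : List (List String) × List String) question =>
      if question = "\n" then (st.1 ++ [st.2], ([] : List String))
      else (st.1, st.2 ++ [question])) = bStep from rfl]
  simp only [h]
  rfl

-- ===== VERDICT (by name: the statement is the Claim_ definition above) =====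
theorem count_spec : Claim_equal_count := by
  intro qs _
  show count qs = count_alt qs
  rw [count_eq, count_alt_eq]
  have h0 : usedOf [] = ([] : List Char) := rfl
  have := foldl_aStepL qs [] 0
  rw [h0] at this
  rw [this]
  simp [gval, usedOf]
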